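-- pv_equiv track=rewrite | github.com/animeshokhade/dsa | scaler/Amazing Subarrays.py | solve
-- ===== SOURCE A (Python) =====
-- def solve(A):
--     n = len(A)
--     vowel = {'a', 'A', 'e', 'E', 'i', 'I', 'o', 'O', 'u', 'U'}
--     x = 0
--     for index, char in enumerate(A):
--         if char in vowel:
--             x += n - index
--     return x % 10003
-- ===== SOURCE B (Python) =====
-- def solve(A):
--     count = 0
--     total = 0
--     for char in A:
--         if char in 'aAeEiIoOuU':
--             count += 1
--         total += count
--     return total % 10003
-- ===== Notes on version B (the rewrite author's own statement) =====
-- stated objective: alternative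
-- what changed: Replaces the conditional addition of (n - index) at each vowel with an unconditional per-position accumulation of a running prefix-vowel counter, dropping the need for len(A) and enumerate.
import Mathlib
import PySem

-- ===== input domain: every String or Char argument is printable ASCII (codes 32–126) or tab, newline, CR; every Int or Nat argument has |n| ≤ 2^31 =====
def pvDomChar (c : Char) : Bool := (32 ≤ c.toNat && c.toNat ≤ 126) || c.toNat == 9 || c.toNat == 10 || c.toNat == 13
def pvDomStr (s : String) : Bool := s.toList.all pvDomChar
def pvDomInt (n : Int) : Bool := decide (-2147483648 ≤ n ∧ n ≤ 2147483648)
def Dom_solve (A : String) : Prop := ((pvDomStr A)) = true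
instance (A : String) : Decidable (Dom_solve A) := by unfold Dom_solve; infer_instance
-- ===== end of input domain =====

-- B replaces A's conditional addition of (n - index) at each vowel by an unconditional
-- per-position accumulation of a running prefix-vowel counter (objective: alternative).

def isVowel (c : Char) : Bool :=
  c = 'a' || c = 'A' || c = 'e' || c = 'E' || c = 'i' || c = 'I' ||
  c = 'o' || c = 'O' || c = 'u' || c = 'U'

-- ===== PORT A =====
def solve (A : String) : Int :=
  let n : Int := A.toList.length
  let x : Int :=
    (PySem.List.enumerate A.toList 0).foldl
      (fun x p => if isVowel p.2 then x + (n - p.1) else x) 0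
  PySem.Int.mod x 10003

-- ===== PORT B =====
def solve_alt (A : String) : Int :=
  let st : Int × Int :=
    A.toList.foldl
      (fun st ch =>
        let count := if isVowel ch then st.1 + 1 else st.1
        (count, st.2 + count)) (0, 0)
  PySem.Int.mod st.2 10003

-- ===== PRECONDITION & SPEC =====
def Spec_solve (A : String) (out : Int) : Prop := out = solve_alt A
instance (A : String) (out : Int) : Decidable (Spec_solve A out) := by unfold Spec_solve; infer_instance

-- ===== CLAIM (what is proved, stated in full; the proofs are below) =====
def Claim_equal_solve : Prop := ∀ (A : String), Dom_solve A → Spec_solve A (solve A)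

-- ===== LEMMAS AND PROOFS =====

-- Invariant relating the two folds after consuming any list l (A's fold uses the fixed
-- total length n): x = t + c * (n - |l|), where (c, t) is B's state.
theorem fold_invariant (n : Int) (l : List Char) :
    ((PySem.List.enumerate l 0).foldl
      (fun x p => if isVowel p.2 then x + (n - p.1) else x) 0)
    = (l.foldl (fun (st : Int × Int) ch =>
        let count := if isVowel ch then st.1 + 1 else st.1
        (count, st.2 + count)) (0, 0)).2
      + (l.foldl (fun (st : Int × Int) ch =>
          let count := if isVowel ch then st.1 + 1 else st.1
          (count, st.2 + count)) (0, 0)).1 * (n - l.length) := by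
  induction l using List.reverseRecOn with
  | nil => simp [PySem.List.enumerate]
  | append_singleton l a ih =>
    simp only [PySem.List.enumerate_append, PySem.List.enumerate_cons,
      PySem.List.enumerate_nil, List.foldl_append, List.foldl_cons,
      List.foldl_nil, List.length_append, List.length_cons, List.length_nil]
    by_cases hv : isVowel a
    · simp only [hv, if_true, ih]
      push_cast
      ring
    · simp only [hv, if_false, Bool.false_eq_true, ih]
      push_cast
      ring

-- ===== VERDICT (by name: the statement is the Claim_ definition above) =====
theorem solve_spec : Claim_equal_solve := by
  intro A _
  show solve A = solve_alt A
  simp only [solve, solve_alt]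
  rw [fold_invariant (A.toList.length) A.toList]
  simp
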